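-- pv_equiv track=rewrite | github.com/Cloudy17g35/LeetCode-solutions | 2078. Two Furthest Houses With Different Colors.py | maxDistance
-- ===== SOURCE A (Python) =====
-- from typing import List
--
-- def maxDistance(colors: List[int]) -> int:
--     i, k = 0, len(colors) - 1
--
--     maximal_distance = 0
--     for i in range(len(colors)):
--         for j in range(len(colors) - 1):
--             if colors[i] != colors[j + 1] and j - i > maximal_distance:
--                 maximal_distance = j - i
--
--     return maximal_distance + 1
-- ===== SOURCE B (Python) =====
-- from typing import List
--
-- def maxDistance(colors: List[int]) -> int:
--     # Single pass: an optimal pair always uses house 0 or house n-1 as one endpoint.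
--     n = len(colors)
--     if n == 0:
--         return 0
--     first, last = colors[0], colors[-1]
--     best = 0
--     for i, c in enumerate(colors):
--         if c != last and n - 1 - i > best:
--             best = n - 1 - i
--         if c != first and i > best:
--             best = i
--     return best
-- ===== Notes on version B (the rewrite author's own statement) =====
-- stated objective: faster
-- what changed: Replaced A's quadratic double loop over all index pairs by a single pass using the fact that an optimal pair of differently-colored houses always has house 0 or house n-1 as an endpoint.
-- intended difference: On lists where all houses have the same color (including empty and singleton lists) A returns 1 although no valid differently-colored pair exists, while B returns 0, the intended answer when no pair qualifies. — e.g. on maxDistance([0, 0]): A returns 1, B returns 0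
import Mathlib
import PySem

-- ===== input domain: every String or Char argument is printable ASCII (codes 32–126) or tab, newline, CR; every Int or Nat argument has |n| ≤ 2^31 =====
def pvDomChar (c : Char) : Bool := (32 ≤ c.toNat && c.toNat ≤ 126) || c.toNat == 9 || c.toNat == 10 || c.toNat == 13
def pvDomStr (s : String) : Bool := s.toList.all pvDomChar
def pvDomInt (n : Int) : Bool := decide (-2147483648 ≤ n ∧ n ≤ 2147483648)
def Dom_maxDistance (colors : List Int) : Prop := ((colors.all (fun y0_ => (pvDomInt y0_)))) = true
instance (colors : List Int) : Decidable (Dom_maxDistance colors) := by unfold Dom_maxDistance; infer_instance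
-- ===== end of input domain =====

-- B replaces A's O(n^2) double loop by a single pass using endpoint houses 0 and n-1.

-- ===== PORT A =====
def maxDistance (colors : List Int) : Int :=
  let n : Int := colors.length
  let md : Int :=
    (PySem.List.pyRange 0 n 1).foldl (fun md i =>
      (PySem.List.pyRange 0 (n - 1) 1).foldl (fun md j =>
        if PySem.List.pyGet? colors i ≠ PySem.List.pyGet? colors (j + 1) ∧ j - i > md
        then j - i else md) md) 0
  md + 1

-- ===== PORT B =====
def maxDistance_alt (colors : List Int) : Int :=
  match colors with
  | [] => 0
  | c :: cs =>
    let n : Int := (c :: cs).length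
    let first : Int := c
    let last : Int := (c :: cs).getLast (List.cons_ne_nil c cs)
    (PySem.List.enumerate (c :: cs) 0).foldl (fun best p =>
      let best1 := if p.2 ≠ last ∧ n - 1 - p.1 > best then n - 1 - p.1 else best
      if p.2 ≠ first ∧ p.1 > best1 then p.1 else best1) 0

-- ===== PRECONDITION & SPEC =====
-- On all-equal-color lists (including empty and singleton) A returns 1 although no
-- differently-colored pair exists; B returns 0, the intended answer for that corner.
def D_maxDistance (colors : List Int) : Prop := ∀ x ∈ colors, ∀ y ∈ colors, x = y
instance (colors : List Int) : Decidable (D_maxDistance colors) := by unfold D_maxDistance; infer_instance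

def Spec_maxDistance (colors : List Int) (out : Int) : Prop := ¬ D_maxDistance colors → out = maxDistance_alt colors
instance (colors : List Int) (out : Int) : Decidable (Spec_maxDistance colors out) := by unfold Spec_maxDistance; infer_instance

def pvDiffWitness_maxDistance : List Int := ([0, 0])
def pvDiffWitnessOut_maxDistance : Int × Int := (1, 0)

-- ===== CLAIM (what is proved, stated in full; the proofs are below) =====
def Claim_unchanged_maxDistance : Prop := ∀ (colors : List Int), Dom_maxDistance colors → Spec_maxDistance colors (maxDistance colors)
def Claim_changed_maxDistance : Prop := Dom_maxDistance (pvDiffWitness_maxDistance) ∧ D_maxDistance (pvDiffWitness_maxDistance) ∧ maxDistance (pvDiffWitness_maxDistance) = pvDiffWitnessOut_maxDistance.1 ∧ maxDistance_alt (pvDiffWitness_maxDistance) = pvDiffWitnessOut_maxDistance.2 ∧ pvDiffWitnessOut_maxDistance.1 ≠ pvDiffWitnessOut_maxDistance.2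
def Claim_exact_maxDistance : Prop := ∀ (colors : List Int), Dom_maxDistance colors → D_maxDistance colors → maxDistance colors ≠ maxDistance_alt colors

-- ===== LEMMAS AND PROOFS =====

-- candidate value lists: each program's running max is the max of these candidates
def candA (colors : List Int) : List Int :=
  (PySem.List.pyRange 0 (colors.length : Int) 1).flatMap (fun i =>
    ((PySem.List.pyRange 0 ((colors.length : Int) - 1) 1).filter
      (fun j => decide (PySem.List.pyGet? colors i ≠ PySem.List.pyGet? colors (j + 1)))).map
      (fun j => j - i))

def candB (colors : List Int) : List Int :=
  match colors with
  | [] => []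
  | c :: cs =>
    (PySem.List.enumerate (c :: cs) 0).flatMap (fun p =>
      (if p.2 ≠ (c :: cs).getLast (List.cons_ne_nil c cs) then [((c :: cs).length : Int) - 1 - p.1] else []) ++
      (if p.2 ≠ c then [p.1] else []))

theorem foldl_max_flatMap {α : Type} (L : List α) (g : α → List Int) (a : Int) :
    (L.flatMap g).foldl max a = L.foldl (fun m x => (g x).foldl max m) a := by
  induction L generalizing a with
  | nil => rfl
  | cons x xs ih => simp [List.flatMap_cons, List.foldl_append, ih]

theorem maxDistance_eq_candA (colors : List Int) :
    maxDistance colors = (candA colors).foldl max 0 + 1 := by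
  unfold maxDistance candA
  dsimp only
  rw [foldl_max_flatMap]
  congr 1
  apply PySem.List.foldl_congr_mem
  intro md i _
  rw [List.foldl_map,
      ← PySem.List.foldl_ite_eq_foldl_filter
        (p := fun j => PySem.List.pyGet? colors i ≠ PySem.List.pyGet? colors (j + 1))
        (f := fun m j => max m (j - i))]
  apply PySem.List.foldl_congr_mem
  intro m j _
  by_cases hP : PySem.List.pyGet? colors i = PySem.List.pyGet? colors (j + 1)
  · simp [hP]
  · simp [hP]
    split_ifs <;> omega

theorem maxDistance_alt_eq_candB (colors : List Int) :
    maxDistance_alt colors = (candB colors).foldl max 0 := by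
  cases colors with
  | nil => rfl
  | cons c cs =>
    unfold maxDistance_alt candB
    dsimp only
    rw [foldl_max_flatMap]
    apply PySem.List.foldl_congr_mem
    intro best p _
    split_ifs <;>
      simp only [List.foldl_cons, List.foldl_nil, List.nil_append, List.singleton_append,
        List.append_nil] <;>
      omega

-- running max bounds (specialized to base 0)
theorem foldl_max_le (L : List Int) (b : Int) (h0 : 0 ≤ b) (h : ∀ v ∈ L, v ≤ b) :
    L.foldl max 0 ≤ b := by
  rcases PySem.List.foldl_max_mem L 0 with h' | h'
  · omega
  · exact h _ h'

theorem le_foldl_max_of_mem (L : List Int) (v : Int) (h : v ∈ L) : v ≤ L.foldl max 0 :=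
  (PySem.List.le_foldl_max L 0).2 v h

-- membership characterizations in Nat-index form
theorem mem_candA (colors : List Int) (v : Int) :
    v ∈ candA colors ↔ ∃ a b : Nat, a < colors.length ∧ b < colors.length ∧ 1 ≤ b ∧
      colors[a]! ≠ colors[b]! ∧ v = (b : Int) - 1 - (a : Int) := by
  unfold candA
  simp only [List.mem_flatMap, List.mem_map, List.mem_filter, PySem.List.mem_pyRange_one,
    decide_eq_true_eq]
  constructor
  · rintro ⟨i, ⟨hi0, hin⟩, j, ⟨⟨hj0, hjn⟩, hne⟩, hv⟩
    refine ⟨i.toNat, (j + 1).toNat, by omega, by omega, by omega, ?_, by omega⟩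
    rw [getElem!_pos colors i.toNat (by omega), getElem!_pos colors (j + 1).toNat (by omega)]
    intro h
    exact hne (by
      rw [PySem.List.pyGet?_eq_some_getElem colors hi0 hin,
          PySem.List.pyGet?_eq_some_getElem colors (by omega) (by omega)]
      exact congrArg some h)
  · rintro ⟨a, b, ha, hb, hb1, hne, hv⟩
    refine ⟨(a : Int), ⟨by omega, by omega⟩, (b : Int) - 1, ⟨⟨by omega, by omega⟩, ?_⟩, by omega⟩
    have hb' : ((b : Int) - 1) + 1 = (b : Int) := by omega
    rw [hb']
    intro h
    apply hne
    rw [getElem!_pos colors a (by omega), getElem!_pos colors b (by omega)]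
    rw [PySem.List.pyGet?_eq_some_getElem colors (by omega) (by omega),
        PySem.List.pyGet?_eq_some_getElem colors (by omega) (by omega)] at h
    simpa using h

theorem mem_candB (c : Int) (cs : List Int) (v : Int) :
    v ∈ candB (c :: cs) ↔ ∃ a : Nat, a < (c :: cs).length ∧
      (((c :: cs)[a]! ≠ (c :: cs).getLast (List.cons_ne_nil c cs) ∧ v = ((c :: cs).length : Int) - 1 - (a : Int)) ∨
       ((c :: cs)[a]! ≠ c ∧ v = (a : Int))) := by
  unfold candB
  simp only [List.mem_flatMap, PySem.List.mem_enumerate_iff]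
  constructor
  · rintro ⟨p, ⟨k, hk, rfl⟩, hmem⟩
    refine ⟨k, hk, ?_⟩
    dsimp only at hmem
    rcases List.mem_append.mp hmem with h | h
    · left
      split_ifs at h with hc
      · simp only [List.mem_singleton] at h
        exact ⟨by rw [getElem!_pos _ k hk]; exact hc, by omega⟩
      · simp at h
    · right
      split_ifs at h with hc
      · simp only [List.mem_singleton] at h
        exact ⟨by rw [getElem!_pos _ k hk]; exact hc, by omega⟩
      · simp at h
  · rintro ⟨a, ha, h⟩
    refine ⟨((0 : Int) + (a : Int), (c :: cs)[a]), ⟨a, ha, rfl⟩, ?_⟩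
    dsimp only
    rcases h with ⟨hne, hv⟩ | ⟨hne, hv⟩
    · apply List.mem_append_left
      rw [getElem!_pos _ a ha] at hne
      rw [if_pos hne]
      simp only [List.mem_singleton]
      omega
    · apply List.mem_append_right
      rw [getElem!_pos _ a ha] at hne
      rw [if_pos hne]
      simp only [List.mem_singleton]
      omega

-- last = colors[n-1]
theorem getLast_eq_getElem_bang (c : Int) (cs : List Int) :
    (c :: cs).getLast (List.cons_ne_nil c cs) = (c :: cs)[(c :: cs).length - 1]! := by
  rw [List.getLast_eq_getElem, getElem!_pos _ _ (by simp)]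
  rfl

-- MB ≤ MA + 1
theorem candB_le (c : Int) (cs : List Int) (v : Int) (hv : v ∈ candB (c :: cs)) :
    v ≤ (candA (c :: cs)).foldl max 0 + 1 := by
  have h0 := (PySem.List.le_foldl_max (candA (c :: cs)) 0).1
  have hn1 : 1 ≤ (c :: cs).length := by simp
  rw [mem_candB] at hv
  obtain ⟨a, ha, h⟩ := hv
  rcases h with ⟨hne, hv⟩ | ⟨hne, hv⟩
  · by_cases hd : ((c :: cs).length : Int) - 1 - (a : Int) ≥ 1
    · have hm : (((c :: cs).length : Int) - 2 - (a : Int)) ∈ candA (c :: cs) := by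
        rw [mem_candA]
        refine ⟨a, (c :: cs).length - 1, ha, by omega, by omega, ?_, by omega⟩
        rw [← getLast_eq_getElem_bang]
        exact hne
      have := le_foldl_max_of_mem _ _ hm
      omega
    · omega
  · by_cases hd : (a : Int) ≥ 1
    · have hc0 : (c :: cs)[0]! = c := by
        rw [getElem!_pos (c :: cs) 0 (by simp)]
        simp
      have hm : ((a : Int) - 1) ∈ candA (c :: cs) := by
        rw [mem_candA]
        refine ⟨0, a, by omega, ha, by omega, ?_, by omega⟩
        rw [hc0]
        exact Ne.symm hne
      have := le_foldl_max_of_mem _ _ hm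
      omega
    · have ha0 : a = 0 := by omega
      exfalso
      apply hne
      rw [ha0, getElem!_pos (c :: cs) 0 (by simp)]
      simp

-- MA + 1 ≤ MB for non-constant lists
theorem candA_lt (c : Int) (cs : List Int) (v : Int) (hv : v ∈ candA (c :: cs)) :
    v + 1 ≤ (candB (c :: cs)).foldl max 0 ∨ v + 1 ≤ 1 := by
  rw [mem_candA] at hv
  obtain ⟨a, b, ha, hb, hb1, hne, hv⟩ := hv
  have hn1 : 1 ≤ (c :: cs).length := by simp
  by_cases hd : v ≥ 1
  swap
  · right; omega
  left
  by_cases h1 : (c :: cs)[a]! = (c :: cs).getLast (List.cons_ne_nil c cs)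
  · by_cases h2 : (c :: cs)[b]! = c
    · -- colors[a] = last, colors[b] = first, and they differ: index n-1 differs from first
      have hlast : (c :: cs)[(c :: cs).length - 1]! ≠ c := by
        intro heq
        apply hne
        rw [h1, getLast_eq_getElem_bang, heq, h2]
      have hm : (((c :: cs).length - 1 : Nat) : Int) ∈ candB (c :: cs) := by
        rw [mem_candB]; exact ⟨(c :: cs).length - 1, by omega, Or.inr ⟨hlast, rfl⟩⟩
      have := le_foldl_max_of_mem _ _ hm
      omega
    · have hm : ((b : Nat) : Int) ∈ candB (c :: cs) := by
        rw [mem_candB]; exact ⟨b, hb, Or.inr ⟨h2, rfl⟩⟩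
      have := le_foldl_max_of_mem _ _ hm
      omega
  · have hm : (((c :: cs).length : Int) - 1 - (a : Int)) ∈ candB (c :: cs) := by
      rw [mem_candB]; exact ⟨a, ha, Or.inl ⟨h1, rfl⟩⟩
    have := le_foldl_max_of_mem _ _ hm
    omega

-- a non-constant list has an element different from the head, at a positive index: MB ≥ 1
theorem candB_ge_one (c : Int) (cs : List Int) (hnc : ¬ D_maxDistance (c :: cs)) :
    1 ≤ (candB (c :: cs)).foldl max 0 := by
  have key : ∃ a : Nat, a < (c :: cs).length ∧ (c :: cs)[a]! ≠ c := by
    by_contra hall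
    apply hnc
    intro x hx y hy
    obtain ⟨i, hi, rfl⟩ := List.mem_iff_getElem.mp hx
    obtain ⟨j, hj, rfl⟩ := List.mem_iff_getElem.mp hy
    have hxi : (c :: cs)[i] = c := by
      have := not_exists.mp hall i
      rw [not_and, not_not] at this
      have := this hi
      rwa [getElem!_pos _ i hi] at this
    have hyj : (c :: cs)[j] = c := by
      have := not_exists.mp hall j
      rw [not_and, not_not] at this
      have := this hj
      rwa [getElem!_pos _ j hj] at this
    rw [hxi, hyj]
  obtain ⟨a, ha, hne⟩ := key
  have ha1 : 1 ≤ a := by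
    rcases Nat.eq_zero_or_pos a with rfl | h
    · exfalso; apply hne; rw [getElem!_pos (c :: cs) 0 (by simp)]; simp
    · omega
  have hm : ((a : Nat) : Int) ∈ candB (c :: cs) := by
    rw [mem_candB]; exact ⟨a, ha, Or.inr ⟨hne, rfl⟩⟩
  have := le_foldl_max_of_mem _ _ hm
  omega

-- constant lists: both candidate lists are empty
theorem candA_nil_of_const (colors : List Int) (hD : D_maxDistance colors) :
    candA colors = [] := by
  rw [List.eq_nil_iff_forall_not_mem]
  intro v hv
  rw [mem_candA] at hv
  obtain ⟨a, b, ha, hb, _, hne, _⟩ := hv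
  apply hne
  rw [getElem!_pos _ a ha, getElem!_pos _ b hb]
  exact hD _ (colors.getElem_mem ha) _ (colors.getElem_mem hb)

theorem candB_nil_of_const (c : Int) (cs : List Int) (hD : D_maxDistance (c :: cs)) :
    candB (c :: cs) = [] := by
  rw [List.eq_nil_iff_forall_not_mem]
  intro v hv
  rw [mem_candB] at hv
  obtain ⟨a, ha, h⟩ := hv
  have hmem : (c :: cs)[a]! ∈ (c :: cs) := by
    rw [getElem!_pos _ a ha]; exact (c :: cs).getElem_mem ha
  have hlast : (c :: cs).getLast (List.cons_ne_nil c cs) ∈ (c :: cs) := List.getLast_mem _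
  rcases h with ⟨hne, _⟩ | ⟨hne, _⟩
  · exact hne (hD _ hmem _ hlast)
  · exact hne (hD _ hmem _ (List.mem_cons_self))

-- ===== VERDICT (by name: the statement is the Claim_ definition above) =====
theorem maxDistance_spec : Claim_unchanged_maxDistance := by
  intro colors _ hnc
  cases colors with
  | nil => exact absurd (by intro x hx; simp at hx) hnc
  | cons c cs =>
    rw [maxDistance_eq_candA, maxDistance_alt_eq_candB]
    have hB1 := candB_ge_one c cs hnc
    have h1 : (candB (c :: cs)).foldl max 0 ≤ (candA (c :: cs)).foldl max 0 + 1 :=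
      foldl_max_le _ _ (by have := (PySem.List.le_foldl_max (candA (c :: cs)) 0).1; omega)
        (candB_le c cs)
    have h2 : (candA (c :: cs)).foldl max 0 + 1 ≤ (candB (c :: cs)).foldl max 0 := by
      have := foldl_max_le (candA (c :: cs)) ((candB (c :: cs)).foldl max 0 - 1)
        (by omega)
        (fun v hv => by rcases candA_lt c cs v hv with h | h <;> omega)
      omega
    omega

theorem maxDistance_changed : Claim_changed_maxDistance := by
  unfold Claim_changed_maxDistance; decide

theorem maxDistance_tight : Claim_exact_maxDistance := by
  intro colors _ hD
  cases colors with
  | nil => decide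
  | cons c cs =>
    rw [maxDistance_eq_candA, maxDistance_alt_eq_candB,
        candA_nil_of_const _ hD, candB_nil_of_const c cs hD]
    simp
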